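-- pv_equiv track=rewrite | github.com/pstumbaugh/PORTFOLIO-Web-Development-HTML5-CSS-Node.js-JavaScript-C-Cpp-Flutter-Dart-Rust-Assembly-Language | Python/TCP Protocol Simulator/rdt_layer.py | getAckNum
-- ===== SOURCE A (Python) =====
-- def getAckNum(arr):
--     if len(arr) == 0:
--         return 0
--     counter = 0
--     newAckNum = -1
--     i = 0
--     k = 0
--     # loop through array to find any missing acknum's
--     while i < len(arr):
--         while k < len(arr):
--             if counter == arr[k]:
--                 newAckNum = arr[k]
--                 break
--             k += 1
--         k = 0
--         i += 1
--         counter += 4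
--     if newAckNum == -1:
--         return -4  # since calling function will add 4, we want it to return to -1
--     return newAckNum
-- ===== SOURCE B (Python) =====
-- def getAckNum(arr):
--     n = len(arr)
--     if n == 0:
--         return 0
--     cap = 4 * (n - 1)
--     candidates = [v for v in arr if v >= 0 and v % 4 == 0 and v <= cap]
--     return max(candidates) if candidates else -4
-- ===== Notes on version B (the rewrite author's own statement) =====
-- stated objective: faster
-- what changed: A scans the whole array once for each multiple of 4 from 0 to 4*(len-1) (O(n^2)); B makes a single pass filtering the elements that are nonnegative multiples of 4 not exceeding 4*(len-1) and returns their maximum (or the sentinels 0/-4).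
import Mathlib
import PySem

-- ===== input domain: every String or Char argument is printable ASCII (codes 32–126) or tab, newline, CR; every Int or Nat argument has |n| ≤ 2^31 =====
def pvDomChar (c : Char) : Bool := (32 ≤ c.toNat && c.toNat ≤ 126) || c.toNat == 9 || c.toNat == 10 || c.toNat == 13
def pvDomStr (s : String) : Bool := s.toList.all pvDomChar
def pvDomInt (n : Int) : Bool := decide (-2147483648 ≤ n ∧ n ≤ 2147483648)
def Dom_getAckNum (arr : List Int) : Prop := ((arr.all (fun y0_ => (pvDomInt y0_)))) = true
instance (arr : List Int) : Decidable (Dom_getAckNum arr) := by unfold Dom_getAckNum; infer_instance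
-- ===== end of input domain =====

-- B replaces A's quadratic scan (one full pass over the array per multiple of 4 up to
-- 4*(len-1)) by a single filter-and-max pass; objective: faster.

-- ===== PORT A =====
-- inner 'while k < len(arr)' loop: scan for the first element equal to counter
def pvInnerA (counter cur : Int) : List Int → Int
  | [] => cur
  | a :: rest => if a = counter then a else pvInnerA counter cur rest

-- outer 'while i < len(arr)' loop: fuel = number of remaining iterations
def pvOuterA (arr : List Int) : Nat → Int → Int → Int
  | 0, _, cur => cur
  | n + 1, counter, cur => pvOuterA arr n (counter + 4) (pvInnerA counter cur arr)

def getAckNum (arr : List Int) : Int :=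
  if arr.length = 0 then 0
  else
    let r := pvOuterA arr arr.length 0 (-1)
    if r = -1 then -4 else r

-- ===== PORT B =====
def getAckNum_alt (arr : List Int) : Int :=
  let n : Int := arr.length
  if n = 0 then 0
  else
    let cap := 4 * (n - 1)
    let candidates := arr.filter
      (fun v => decide (0 ≤ v) && decide (PySem.Int.mod v 4 = 0) && decide (v ≤ cap))
    match PySem.List.max? candidates (fun x => x) with
    | some m => m
    | none => -4

-- ===== PRECONDITION & SPEC =====
def Spec_getAckNum (arr : List Int) (out : Int) : Prop := out = getAckNum_alt arr
instance (arr : List Int) (out : Int) : Decidable (Spec_getAckNum arr out) := by unfold Spec_getAckNum; infer_instance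

-- ===== CLAIM (what is proved, stated in full; the proofs are below) =====
def Claim_equal_getAckNum : Prop := ∀ (arr : List Int), Dom_getAckNum arr → Spec_getAckNum arr (getAckNum arr)

-- ===== LEMMAS AND PROOFS =====

lemma pvInnerA_eq (counter cur : Int) (l : List Int) :
    pvInnerA counter cur l = if counter ∈ l then counter else cur := by
  induction l with
  | nil => simp [pvInnerA]
  | cons a rest ih =>
    by_cases h : a = counter
    · subst h; simp [pvInnerA]
    · simp [pvInnerA, h, ih, Ne.symm h]

lemma pvOuterA_peel (arr : List Int) (fuel : Nat) (counter cur : Int) :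
    pvOuterA arr (fuel + 1) counter cur =
      if (counter + 4 * fuel) ∈ arr then counter + 4 * fuel
      else pvOuterA arr fuel counter cur := by
  induction fuel generalizing counter cur with
  | zero => simp [pvOuterA, pvInnerA_eq]
  | succ f ih =>
    show pvOuterA arr (f + 1) (counter + 4) (pvInnerA counter cur arr) = _
    rw [ih, pvInnerA_eq]
    have h4 : counter + 4 + 4 * (f : Int) = counter + 4 * ((f : Int) + 1) := by ring
    simp only [pvOuterA, pvInnerA_eq, Nat.cast_succ, h4]

-- characterization of A's outer loop started at counter = 0, newAckNum = -1
lemma pvOuterA_char (arr : List Int) (n : Nat) :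
    (pvOuterA arr n 0 (-1) = -1 ∧ ∀ j : Nat, j < n → (4 * (j : Int)) ∉ arr) ∨
    (∃ j : Nat, j < n ∧ pvOuterA arr n 0 (-1) = 4 * (j : Int) ∧ (4 * (j : Int)) ∈ arr ∧
      ∀ j' : Nat, j < j' → j' < n → (4 * (j' : Int)) ∉ arr) := by
  induction n with
  | zero => left; exact ⟨rfl, by omega⟩
  | succ m ih =>
    have peel := pvOuterA_peel arr m 0 (-1)
    simp only [zero_add] at peel
    by_cases hm : (4 * (m : Int)) ∈ arr
    · right
      refine ⟨m, by omega, ?_, hm, ?_⟩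
      · rw [peel]; simp [hm]
      · intro j' h1 h2; omega
    · rw [if_neg hm] at peel
      rcases ih with ⟨he, hnone⟩ | ⟨j, hj, hval, hmem, hmax⟩
      · left
        refine ⟨by rw [peel]; exact he, ?_⟩
        intro j hjm
        rcases Nat.lt_succ_iff_lt_or_eq.mp hjm with h | h
        · exact hnone j h
        · subst h; exact hm
      · right
        refine ⟨j, by omega, by rw [peel]; exact hval, hmem, ?_⟩
        intro j' h1 h2
        rcases Nat.lt_succ_iff_lt_or_eq.mp h2 with h | h
        · exact hmax j' h1 h
        · subst h; exact hm

-- an element qualifies for B's filter iff it is 4*j for some j < arr.length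
lemma pvQual_iff (n : Nat) (v : Int) :
    (0 ≤ v ∧ PySem.Int.mod v 4 = 0 ∧ v ≤ 4 * ((n : Int) - 1)) ↔
      ∃ j : Nat, j < n ∧ v = 4 * (j : Int) := by
  constructor
  · rintro ⟨h0, hmod, hcap⟩
    rw [PySem.Int.mod_eq_emod_of_pos (by norm_num : (0:Int) < 4)] at hmod
    have hdvd : (4 : Int) ∣ v := Int.dvd_of_emod_eq_zero hmod
    obtain ⟨c, hc⟩ := hdvd
    have hc0 : 0 ≤ c := by omega
    refine ⟨c.toNat, ?_, ?_⟩
    · omega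
    · simp [hc, Int.toNat_of_nonneg hc0]
  · rintro ⟨j, hj, rfl⟩
    refine ⟨by positivity, ?_, by omega⟩
    rw [PySem.Int.mod_eq_emod_of_pos (by norm_num : (0:Int) < 4)]
    omega

-- ===== VERDICT (by name: the statement is the Claim_ definition above) =====
theorem getAckNum_spec : Claim_equal_getAckNum := by
  intro arr _
  unfold Spec_getAckNum getAckNum getAckNum_alt
  by_cases hlen : arr.length = 0
  · simp [hlen]
  · have hlenI : (arr.length : Int) ≠ 0 := by exact_mod_cast hlen
    simp only [hlen, hlenI, if_false]
    set n := arr.length with hn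
    set cand := arr.filter
      (fun v => decide (0 ≤ v) && decide (PySem.Int.mod v 4 = 0) && decide (v ≤ 4 * ((n : Int) - 1))) with hcand
    have hmemc : ∀ v : Int, v ∈ cand ↔ v ∈ arr ∧ ∃ j : Nat, j < n ∧ v = 4 * (j : Int) := by
      intro v
      rw [hcand, List.mem_filter]
      simp only [Bool.and_eq_true, decide_eq_true_eq, and_assoc]
      exact and_congr_right (fun _ => pvQual_iff n v)
    rcases pvOuterA_char arr n with ⟨he, hnone⟩ | ⟨j, hj, hval, hmem, hmax⟩
    · -- no qualifying element: candidates empty, both sides -4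
      have hce : cand = [] := by
        rcases List.eq_nil_or_concat cand with h | ⟨l, a, h⟩
        · exact h
        · exfalso
          have : a ∈ cand := by simp [h]
          obtain ⟨hma, j, hjn, rfl⟩ := (hmemc a).mp this
          exact hnone j hjn hma
      rw [(PySem.List.max?_eq_none_iff _ _).mpr hce]
      simp [he]
    · -- R = 4*j is the maximum qualifying value
      have hjc : (4 * (j : Int)) ∈ cand := (hmemc _).mpr ⟨hmem, j, hj, rfl⟩
      have hne : cand ≠ [] := by intro h; rw [h] at hjc; exact absurd hjc (List.not_mem_nil)
      cases hm : PySem.List.max? cand (fun x => x) with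
      | none => exact absurd ((PySem.List.max?_eq_none_iff _ _).mp hm) hne
      | some m =>
        have hmmem : m ∈ cand := PySem.List.max?_mem hm
        have hmismax : ∀ y ∈ cand, y ≤ m := fun y hy => PySem.List.max?_isMax hm y hy
        obtain ⟨hma, jm, hjm, hmeq⟩ := (hmemc m).mp hmmem
        have h1 : 4 * (j : Int) ≤ m := hmismax _ hjc
        have h2 : m ≤ 4 * (j : Int) := by
          subst hmeq
          by_cases hle : jm ≤ j
          · have : (jm : Int) ≤ (j : Int) := by exact_mod_cast hle
            omega
          · exact absurd hma (hmax jm (by omega) hjm)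
        have hRm : pvOuterA arr n 0 (-1) = m := by rw [hval]; omega
        have hmne : m ≠ -1 := by omega
        simp [hRm, hmne]
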